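-- pv_equiv track=rewrite | github.com/joshuaker/intro-to-python-exercises | part04/neighbours_in_list.py | longest_series_of_neighbours
-- ===== SOURCE A (Python) =====
-- def longest_series_of_neighbours(int_list):
--     # for every consecutive integer, count grows by 1
--     # return the length of longest consecutive count
--     # count every consecutive series: if count > longest; longest = count
--
--     # ie. [1, 2, 5, 7, 6, 5, 6, 3, 4, 1, 0]
--     # want to compare int_list[index] with int_list[index + 1]
--     # while index + 1 is still indexable
--     # therefore index + 1 < len(int_list)
--     # because len(int_list) fulfills half_open slicing
--
--     index = 0
--     count = 1
--     longest = 0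
--
--     while index + 1 < len(int_list):
--         if int_list[index] == int_list[index + 1] + 1 or int_list[index] == int_list[index + 1] - 1:
--             # if consecutive numbers are +- 1:
--             count += 1
--         else:
--             count = 1
--         if count > longest:
--             longest = count
--         index += 1
--
--     return longest
-- ===== SOURCE B (Python) =====
-- def longest_series_of_neighbours(int_list):
--     # Break-position method: record positions where adjacency fails (with sentinels
--     # -1 and n-1); the answer is the largest distance between consecutive breaks.
--     n = len(int_list)
--     if n < 2:
--         return 0
--     breaks = [-1]
--     for i, (a, b) in enumerate(zip(int_list, int_list[1:])):
--         if abs(a - b) != 1: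
--             breaks.append(i)
--     breaks.append(n - 1)
--     best = 0
--     for prev, cur in zip(breaks, breaks[1:]):
--         best = max(best, cur - prev)
--     return best
-- ===== Notes on version B (the rewrite author's own statement) =====
-- stated objective: alternative
-- what changed: Instead of A's fused scan maintaining a running count and longest, B records the positions where adjacency breaks (|a-b| != 1) into a list with sentinels -1 and n-1 and returns the maximum distance between consecutive break positions.
import Mathlib
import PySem

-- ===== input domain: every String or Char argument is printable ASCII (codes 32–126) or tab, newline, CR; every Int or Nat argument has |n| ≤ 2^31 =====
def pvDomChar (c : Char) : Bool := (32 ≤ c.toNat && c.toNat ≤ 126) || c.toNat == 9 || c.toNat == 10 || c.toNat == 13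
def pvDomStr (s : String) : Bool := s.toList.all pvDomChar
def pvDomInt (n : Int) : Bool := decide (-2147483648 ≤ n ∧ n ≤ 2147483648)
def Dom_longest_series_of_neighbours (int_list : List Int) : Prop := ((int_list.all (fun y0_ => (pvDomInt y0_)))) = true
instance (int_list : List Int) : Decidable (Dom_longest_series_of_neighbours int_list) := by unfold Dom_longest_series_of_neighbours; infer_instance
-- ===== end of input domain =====

-- B replaces A's fused running-count scan by a break-position method: it lists the positions where adjacency fails (with sentinels) and returns the largest gap between consecutive breaks; same O(n) cost, proved equal on all inputs ('alternative').


-- ===== PORT A =====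
-- while index + 1 < len: step; index += 1   ported as a fold over pyRange 0 (len-1) 1
def longest_series_of_neighbours (int_list : List Int) : Int :=
  ((PySem.List.pyRange 0 ((int_list.length : Int) - 1) 1).foldl
    (fun (s : Int × Int) i =>
      let count :=
        if PySem.List.pyGetD int_list i 0 = PySem.List.pyGetD int_list (i + 1) 0 + 1 ∨
           PySem.List.pyGetD int_list i 0 = PySem.List.pyGetD int_list (i + 1) 0 - 1
        then s.1 + 1 else 1
      let longest := if count > s.2 then count else s.2
      (count, longest)) (1, 0)).2

-- ===== PORT B =====
def longest_series_of_neighbours_alt (int_list : List Int) : Int :=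
  if (int_list.length : Int) < 2 then 0
  else
    let breaks : List Int :=
      [(-1 : Int)] ++
      ((PySem.List.enumerate (int_list.zip (PySem.List.slice int_list (some 1) none)) 0).filterMap
        (fun ip => if ¬ |ip.2.1 - ip.2.2| = 1 then some ip.1 else none)) ++
      [(int_list.length : Int) - 1]
    (breaks.zip breaks.tail).foldl (fun best p => max best (p.2 - p.1)) 0

-- ===== PRECONDITION & SPEC =====
def Spec_longest_series_of_neighbours (int_list : List Int) (out : Int) : Prop := out = longest_series_of_neighbours_alt int_list
instance (int_list : List Int) (out : Int) : Decidable (Spec_longest_series_of_neighbours int_list out) := by unfold Spec_longest_series_of_neighbours; infer_instance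

-- ===== CLAIM (what is proved, stated in full; the proofs are below) =====
def Claim_equal_longest_series_of_neighbours : Prop := ∀ (int_list : List Int), Dom_longest_series_of_neighbours int_list → Spec_longest_series_of_neighbours int_list (longest_series_of_neighbours int_list)

-- ===== LEMMAS AND PROOFS =====

-- A's step, abstracted over the two compared elements
def pvStepA (s : Int × Int) (a b : Int) : Int × Int :=
  let count := if a = b + 1 ∨ a = b - 1 then s.1 + 1 else 1
  let longest := if count > s.2 then count else s.2
  (count, longest)

-- run/best step on a flag (reference form A is reduced to)
def pvStepB (s : Int × Int) (f : Bool) : Int × Int :=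
  let run := if f then s.1 + 1 else 0
  (run, max s.2 run)

-- break positions of a pair list, indices starting at i
def pvBrk : List (Int × Int) → Int → List Int
  | [], _ => []
  | p :: t, i => if ¬ |p.1 - p.2| = 1 then i :: pvBrk t (i + 1) else pvBrk t (i + 1)

-- max gap between consecutive elements of last :: bs ++ [e]
def pvGap : Int → List Int → Int → Int
  | last, [], e => e - last
  | last, b :: bs, e => max (b - last) (pvGap b bs e)

theorem pv_gap_cons (last b e : Int) (bs : List Int) :
    pvGap last (b :: bs) e = max (b - last) (pvGap b bs e) := rfl

-- indexing a cons one position to the right drops the head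
theorem pv_getD_cons_succ (x : Int) (l : List Int) (i : Int) (hi : 0 ≤ i) :
    PySem.List.pyGetD (x :: l) (i + 1) 0 = PySem.List.pyGetD l i 0 := by
  obtain ⟨n, rfl⟩ := Int.eq_ofNat_of_zero_le hi
  have h : (n : Int) + 1 = ((n + 1 : Nat) : Int) := by push_cast; ring
  rw [h, PySem.List.pyGetD_natCast, PySem.List.pyGetD_natCast]
  simp [List.getD]

-- shift lemma: folding A's indexed step over pyRange (a+1) (b+1) on (x :: l) is the fold over pyRange a b on l
theorem pv_shift (x : Int) (l : List Int) (a b : Int) (ha : 0 ≤ a) (s : Int × Int) :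
    (PySem.List.pyRange (a + 1) (b + 1) 1).foldl
      (fun s i => pvStepA s (PySem.List.pyGetD (x :: l) i 0) (PySem.List.pyGetD (x :: l) (i + 1) 0)) s
    = (PySem.List.pyRange a b 1).foldl
      (fun s i => pvStepA s (PySem.List.pyGetD l i 0) (PySem.List.pyGetD l (i + 1) 0)) s := by
  by_cases hab : b ≤ a
  · rw [PySem.List.pyRange_one_eq_nil (by omega), PySem.List.pyRange_one_eq_nil hab]
    rfl
  · push Not at hab
    have hn : (b - a).toNat ≠ 0 := by omega
    induction hk : (b - a).toNat generalizing a s with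
    | zero => omega
    | succ k ih =>
      rw [PySem.List.pyRange_one_cons (by omega : a + 1 < b + 1),
          PySem.List.pyRange_one_cons (by omega : a < b)]
      simp only [List.foldl_cons]
      rw [pv_getD_cons_succ x l a ha, pv_getD_cons_succ x l (a + 1) (by omega)]
      by_cases hk2 : a + 1 < b
      · exact ih (a + 1) (by omega) _ hk2 (by omega) (by omega)
      · rw [PySem.List.pyRange_one_eq_nil (by omega : b + 1 ≤ a + 1 + 1),
            PySem.List.pyRange_one_eq_nil (by omega : b ≤ a + 1)]
        rfl

-- index fold over pyRange equals the fold over zipped consecutive pairs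
theorem pv_index_to_zip (l : List Int) (s : Int × Int) :
    (PySem.List.pyRange 0 ((l.length : Int) - 1) 1).foldl
      (fun s i => pvStepA s (PySem.List.pyGetD l i 0) (PySem.List.pyGetD l (i + 1) 0)) s
    = (l.zip l.tail).foldl (fun s p => pvStepA s p.1 p.2) s := by
  induction l generalizing s with
  | nil => simp [PySem.List.pyRange_one_eq_nil]
  | cons x t ih =>
    cases t with
    | nil => simp [PySem.List.pyRange_one_eq_nil]
    | cons y u =>
      have hlen : ((x :: y :: u).length : Int) - 1 = ((y :: u).length : Int) - 1 + 1 := by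
        simp
      rw [hlen, PySem.List.pyRange_one_cons (by simp)]
      simp only [List.foldl_cons]
      have h0 : PySem.List.pyGetD (x :: y :: u) 0 0 = x := by
        simp [PySem.List.pyGetD_zero_cons]
      have h1 : PySem.List.pyGetD (x :: y :: u) (0 + 1) 0 = y := by
        rw [pv_getD_cons_succ x (y :: u) 0 le_rfl]
        simp [PySem.List.pyGetD_zero_cons]
      rw [h0, h1]
      have := pv_shift x (y :: u) 0 (((y :: u).length : Int) - 1) le_rfl (pvStepA s x y)
      rw [zero_add] at this ⊢
      rw [this, ih]
      simp

-- the two ports test the same adjacency condition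
theorem pv_cond (x y : Int) : (x = y + 1 ∨ x = y - 1) ↔ |x - y| = 1 := by
  rw [abs_eq (by norm_num : (0:Int) ≤ 1)]
  omega

-- A's (count, longest) fold is the run/best fold shifted by one
theorem pv_inv (ps : List (Int × Int)) (sa sb : Int × Int)
    (h1 : sa.1 = sb.1 + 1) (h2 : 0 ≤ sb.1) (h3 : 0 ≤ sb.2) (h4 : sa.2 = sb.2 + 1) :
    (ps.foldl (fun s p => pvStepA s p.1 p.2) sa).2
    = (ps.foldl (fun s p => pvStepB s (decide (|p.1 - p.2| = 1))) sb).2 + 1 := by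
  induction ps generalizing sa sb with
  | nil => simpa using h4
  | cons p t ih =>
    simp only [List.foldl_cons]
    apply ih <;>
      · by_cases hc : |p.1 - p.2| = 1 <;>
          simp [pvStepA, pvStepB, pv_cond, hc] <;> (try split_ifs) <;> omega

-- first loop iteration establishes the invariant from the two initial states
theorem pv_init (x y : Int) :
    (pvStepA (1, 0) x y).1 = (pvStepB (0, 0) (decide (|x - y| = 1))).1 + 1 ∧
    0 ≤ (pvStepB (0, 0) (decide (|x - y| = 1))).1 ∧
    0 ≤ (pvStepB (0, 0) (decide (|x - y| = 1))).2 ∧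
    (pvStepA (1, 0) x y).2 = (pvStepB (0, 0) (decide (|x - y| = 1))).2 + 1 := by
  by_cases hc : |x - y| = 1 <;>
    simp [pvStepA, pvStepB, pv_cond, hc]

-- every recorded break position is at least the starting index
theorem pv_brk_lb (ps : List (Int × Int)) (i b : Int) (hb : b ∈ pvBrk ps i) : i ≤ b := by
  induction ps generalizing i with
  | nil => simp [pvBrk] at hb
  | cons p t ih =>
    unfold pvBrk at hb
    split at hb
    · rcases List.mem_cons.1 hb with rfl | hb
      · exact le_refl b
      · have := ih (i + 1) hb; omega
    · have := ih (i + 1) hb; omega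

-- lower bound on the max gap from a lower bound on the break positions and the end sentinel
theorem pv_gap_lb (bs : List Int) (last e lb : Int) (hbs : ∀ b ∈ bs, lb ≤ b) (he : lb ≤ e) :
    lb - last ≤ pvGap last bs e := by
  induction bs generalizing last with
  | nil => unfold pvGap; omega
  | cons b t ih =>
    unfold pvGap
    have h1 : lb ≤ b := hbs b (List.mem_cons_self ..)
    have h2 : lb - b ≤ pvGap b t e := ih b (fun x hx => hbs x (List.mem_cons_of_mem _ hx))
    omega

-- main invariant: the run/best fold equals the max break gap (minus one), given the loop relation
theorem pv_fold_eq_gap (ps : List (Int × Int)) (i last run best : Int)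
    (hr : run = i - last - 1) (h0 : 0 ≤ run) (hb : run ≤ best) :
    (ps.foldl (fun s p => pvStepB s (decide (|p.1 - p.2| = 1))) (run, best)).2
    = max best (pvGap last (pvBrk ps i) (i + ps.length) - 1) := by
  induction ps generalizing i last run best with
  | nil =>
    unfold pvBrk pvGap
    simp only [List.foldl_nil, List.length_nil]
    omega
  | cons p t ih =>
    by_cases hc : |p.1 - p.2| = 1
    · -- adjacent: the run grows, no break recorded
      have hstep : pvStepB (run, best) (decide (|p.1 - p.2| = 1)) = (run + 1, max best (run + 1)) := by
        simp [pvStepB, hc]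
      simp only [List.foldl_cons, List.length_cons]
      rw [hstep, show pvBrk (p :: t) i = pvBrk t (i + 1) from by simp [pvBrk, hc]]
      rw [ih (i + 1) last (run + 1) (max best (run + 1)) (by omega) (by omega) (by omega)]
      push_cast
      have hlb : (i + 1) - last ≤ pvGap last (pvBrk t (i + 1)) (i + 1 + t.length) :=
        pv_gap_lb _ _ _ _ (fun b hb => pv_brk_lb t (i + 1) b hb) (by omega)
      have heq : i + ((t.length : Int) + 1) = i + 1 + (t.length : Int) := by ring
      rw [heq]
      omega
    · -- break at position i
      have hstep : pvStepB (run, best) (decide (|p.1 - p.2| = 1)) = (0, max best 0) := by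
        simp [pvStepB, hc]
      simp only [List.foldl_cons, List.length_cons]
      rw [hstep, show pvBrk (p :: t) i = i :: pvBrk t (i + 1) from by simp [pvBrk, hc]]
      rw [ih (i + 1) i 0 (max best 0) (by omega) (by omega) (by omega), pv_gap_cons]
      push_cast
      have heq : i + ((t.length : Int) + 1) = i + 1 + (t.length : Int) := by ring
      rw [heq]
      omega

-- the enumerate/filterMap comprehension computes exactly pvBrk
theorem pv_enum_brk (ps : List (Int × Int)) (i : Int) :
    (PySem.List.enumerate ps i).filterMap
      (fun ip => if ¬ |ip.2.1 - ip.2.2| = 1 then some ip.1 else none) = pvBrk ps i := by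
  induction ps generalizing i with
  | nil => simp [PySem.List.enumerate_nil, pvBrk]
  | cons p t ih =>
    rw [PySem.List.enumerate_cons]
    have ih' := ih (i + 1)
    by_cases hc : |p.1 - p.2| = 1 <;> simp [pvBrk, hc] at ih' ⊢ <;> simpa using ih'

-- the final max-of-differences loop computes pvGap
theorem pv_diff_fold (bs : List Int) (last e r : Int) :
    (((last :: bs ++ [e]).zip (last :: bs ++ [e]).tail).foldl
      (fun best p => max best (p.2 - p.1)) r) = max r (pvGap last bs e) := by
  induction bs generalizing last r with
  | nil => simp [pvGap]
  | cons b t ih =>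
    simp only [List.cons_append, List.tail_cons, List.zip_cons_cons, List.foldl_cons]
    have h := ih b (max r (b - last))
    simp only [List.cons_append, List.tail_cons] at h
    rw [h, pv_gap_cons]
    omega

-- A reduced to the run/best fold over consecutive pairs, plus one
theorem pv_A_eq_fold (x y : Int) (t : List Int) :
    longest_series_of_neighbours (x :: y :: t)
    = ((((x :: y :: t).zip (y :: t)).foldl
        (fun s p => pvStepB s (decide (|p.1 - p.2| = 1))) (0, 0)).2) + 1 := by
  have hA : longest_series_of_neighbours (x :: y :: t)
      = (((x :: y :: t).zip (y :: t)).foldl (fun s p => pvStepA s p.1 p.2) (1, 0)).2 := by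
    unfold longest_series_of_neighbours
    have := pv_index_to_zip (x :: y :: t) (1, 0)
    simp only [List.tail_cons] at this
    exact congrArg Prod.snd this
  rw [hA]
  simp only [List.zip_cons_cons, List.foldl_cons]
  have h := pv_init x y
  exact pv_inv ((y :: t).zip t) (pvStepA (1, 0) x y)
    (pvStepB (0, 0) (decide (|x - y| = 1))) h.1 h.2.1 h.2.2.1 h.2.2.2

-- ===== VERDICT (by name: the statement is the Claim_ definition above) =====
theorem longest_series_of_neighbours_spec : Claim_equal_longest_series_of_neighbours := by
  intro l _
  unfold Spec_longest_series_of_neighbours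
  unfold longest_series_of_neighbours_alt
  by_cases hlen : ((l.length : Int) < 2)
  · rw [if_pos hlen]
    match l, hlen with
    | [], _ => simp [longest_series_of_neighbours, PySem.List.pyRange_one_eq_nil]
    | [x], _ => simp [longest_series_of_neighbours, PySem.List.pyRange_one_eq_nil]
    | x :: y :: t, h => simp at h; omega
  · rw [if_neg hlen]
    match l, hlen with
    | [], h => simp at h
    | [x], h => simp at h
    | x :: y :: t, _ =>
      simp only [PySem.List.slice_from_one, List.tail_cons]
      rw [pv_A_eq_fold x y t]
      rw [pv_fold_eq_gap ((x :: y :: t).zip (y :: t)) 0 (-1) 0 0 (by omega) (by omega) (by omega)]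
      have hlen2 : (((x :: y :: t).zip (y :: t)).length : Int)
          = ((x :: y :: t).length : Int) - 1 := by
        simp [List.length_zip]
      rw [pv_enum_brk, List.singleton_append, pv_diff_fold]
      have hlb : 0 - (-1) ≤ pvGap (-1) (pvBrk ((x :: y :: t).zip (y :: t)) 0)
          (0 + (((x :: y :: t).zip (y :: t)).length : Int)) :=
        pv_gap_lb _ _ _ _ (fun b hb => pv_brk_lb _ 0 b hb) (by omega)
      rw [zero_add] at hlb ⊢
      rw [hlen2] at hlb ⊢
      omega
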